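-- pv_equiv track=rewrite | github.com/grapheneaffiliate/h4-polytopic-attention | solve_arc_b17.py | solve_aedd82e4
-- ===== SOURCE A (Python) =====
-- def solve_aedd82e4(grid):
--     grid = [row[:] for row in grid]
--     rows, cols = len(grid), len(grid[0])
--     for r in range(rows):
--         for c in range(cols):
--             if grid[r][c] == 2:
--                 has_neighbor = False
--                 for dr, dc in [(-1,0),(1,0),(0,-1),(0,1)]:
--                     nr, nc = r+dr, c+dc
--                     if 0 <= nr < rows and 0 <= nc < cols and grid[nr][nc] == 2:
--                         has_neighbor = True
--                         break
--                 if not has_neighbor: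
--                     grid[r][c] = 1
--     return grid
-- ===== SOURCE B (Python) =====
-- def solve_aedd82e4(grid):
--     rows, cols = len(grid), len(grid[0])
--     has = set()
--     for r in range(rows):
--         for c in range(cols - 1):
--             if grid[r][c] == 2 and grid[r][c + 1] == 2:
--                 has.add((r, c))
--                 has.add((r, c + 1))
--     for r in range(rows - 1):
--         for c in range(cols):
--             if grid[r][c] == 2 and grid[r + 1][c] == 2:
--                 has.add((r, c))
--                 has.add((r + 1, c))
--     return [[1 if c < cols and v == 2 and (r, c) not in has else v
--              for c, v in enumerate(row)]
--             for r, row in enumerate(grid)]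
-- ===== Notes on version B (the rewrite author's own statement) =====
-- stated objective: alternative
-- what changed: Instead of scanning each 2-cell's four neighbors while mutating the grid in place, B makes one pass over horizontal and one over vertical adjacent pairs, recording every member of a 2-2 pair in a set, then rebuilds the grid marking 2-cells absent from the set as 1; the per-cell 4-neighbor probe and the in-place mutation disappear.
import Mathlib
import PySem

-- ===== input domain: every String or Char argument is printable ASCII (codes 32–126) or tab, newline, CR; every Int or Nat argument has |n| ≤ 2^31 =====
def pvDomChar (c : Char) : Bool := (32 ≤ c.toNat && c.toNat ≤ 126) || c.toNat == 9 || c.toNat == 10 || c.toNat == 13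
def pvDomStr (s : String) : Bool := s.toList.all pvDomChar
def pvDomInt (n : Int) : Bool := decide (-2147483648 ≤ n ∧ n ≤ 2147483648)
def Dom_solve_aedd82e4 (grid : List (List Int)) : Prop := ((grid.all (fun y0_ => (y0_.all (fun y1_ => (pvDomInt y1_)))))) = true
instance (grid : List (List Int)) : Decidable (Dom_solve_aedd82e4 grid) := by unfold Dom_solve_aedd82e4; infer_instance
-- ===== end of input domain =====

-- B replaces A's mutate-while-scanning 4-neighbor probe by two pair-scan passes that collect
-- every member of an adjacent 2-2 pair in a set, then a pure rebuild; same cost, no mutation.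

-- ===== PORT A =====
-- grid[r][c] (both loop indices are the in-range Nat indices produced by Python's range)
def pvVal (g : List (List Int)) (r c : Nat) : Option Int :=
  g[r]?.bind (fun row => row[c]?)

-- the inner `for dr, dc in [...]` loop with its break: any of the four deltas hits a 2
def pvNb (g : List (List Int)) (rows cols r c : Nat) : Bool :=
  [((-1 : Int), (0 : Int)), (1, 0), (0, -1), (0, 1)].any (fun d =>
    decide (0 ≤ (r : Int) + d.1) && decide ((r : Int) + d.1 < (rows : Int)) &&
    decide (0 ≤ (c : Int) + d.2) && decide ((c : Int) + d.2 < (cols : Int)) &&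
    (pvVal g ((r : Int) + d.1).toNat ((c : Int) + d.2).toNat == some 2))

-- body of A's inner loop: possibly overwrite grid[r][c] with 1
def pvStepA (rows cols r : Nat) (g : List (List Int)) (c : Nat) : List (List Int) :=
  if pvVal g r c == some 2 then
    if pvNb g rows cols r c then g
    else g.modify r (fun row => row.set c 1)
  else g

def pvRowA (rows cols : Nat) (g : List (List Int)) (r : Nat) : List (List Int) :=
  (List.range cols).foldl (pvStepA rows cols r) g

def solve_aedd82e4 (grid : List (List Int)) : List (List Int) :=
  let rows := grid.length
  let cols := (grid.headD []).length
  (List.range rows).foldl (pvRowA rows cols) grid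

-- ===== PORT B =====
-- body of B's horizontal pair scan: both of grid[r][c], grid[r][c+1] equal 2 → add both to the set
def pvHStep (grid : List (List Int)) (r : Nat) (s : PySem.Set (Nat × Nat)) (c : Nat) : PySem.Set (Nat × Nat) :=
  if pvVal grid r c == some 2 && pvVal grid r (c + 1) == some 2 then
    PySem.Set.add (PySem.Set.add s (r, c)) (r, c + 1)
  else s

-- body of B's vertical pair scan
def pvVStep (grid : List (List Int)) (r : Nat) (s : PySem.Set (Nat × Nat)) (c : Nat) : PySem.Set (Nat × Nat) :=
  if pvVal grid r c == some 2 && pvVal grid (r + 1) c == some 2 then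
    PySem.Set.add (PySem.Set.add s (r, c)) (r + 1, c)
  else s

def solve_aedd82e4_alt (grid : List (List Int)) : List (List Int) :=
  let rows := grid.length
  let cols := (grid.headD []).length
  let s1 := (List.range rows).foldl
    (fun s r => (List.range (cols - 1)).foldl (pvHStep grid r) s) PySem.Set.empty
  let s2 := (List.range (rows - 1)).foldl
    (fun s r => (List.range cols).foldl (pvVStep grid r) s) s1
  grid.mapIdx (fun r row => row.mapIdx (fun c v =>
    if c < cols && v == 2 && !(PySem.Set.contains s2 (r, c)) then 1 else v))

-- ===== PRECONDITION & SPEC =====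
-- Pre_ excludes exactly the inputs where Python A raises IndexError: the empty grid
-- (grid[0]) and grids with a row shorter than the first row (grid[r][c] for c < cols).
def Pre_solve_aedd82e4 (grid : List (List Int)) : Prop :=
  grid ≠ [] ∧ ∀ row ∈ grid, (grid.headD []).length ≤ row.length
instance (grid : List (List Int)) : Decidable (Pre_solve_aedd82e4 grid) := by
  unfold Pre_solve_aedd82e4; infer_instance

def pvWitness_solve_aedd82e4 : List (List Int) := [[2, 0, 2], [2, 2, 0], [0, 0, 2]]

def Spec_solve_aedd82e4 (grid : List (List Int)) (out : List (List Int)) : Prop := out = solve_aedd82e4_alt grid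
instance (grid : List (List Int)) (out : List (List Int)) : Decidable (Spec_solve_aedd82e4 grid out) := by unfold Spec_solve_aedd82e4; infer_instance

-- ===== CLAIM (what is proved, stated in full; the proofs are below) =====
def Claim_equal_solve_aedd82e4 : Prop := ∀ (grid : List (List Int)), Dom_solve_aedd82e4 grid → Pre_solve_aedd82e4 grid → Spec_solve_aedd82e4 grid (solve_aedd82e4 grid)

-- ===== LEMMAS AND PROOFS =====

-- pvNb unfolded to its four explicit disjuncts (Nat form)
theorem pvNb_iff (g : List (List Int)) (rows cols r c : Nat) :
    pvNb g rows cols r c = true ↔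
      (1 ≤ r ∧ r - 1 < rows ∧ c < cols ∧ pvVal g (r - 1) c = some 2) ∨
      (r + 1 < rows ∧ c < cols ∧ pvVal g (r + 1) c = some 2) ∨
      (r < rows ∧ 1 ≤ c ∧ c - 1 < cols ∧ pvVal g r (c - 1) = some 2) ∨
      (r < rows ∧ c + 1 < cols ∧ pvVal g r (c + 1) = some 2) := by
  have er1 : ((r : Int) + -1).toNat = r - 1 := by omega
  have er2 : ((r : Int) + 1).toNat = r + 1 := by omega
  have ec1 : ((c : Int) + -1).toNat = c - 1 := by omega
  have ec2 : ((c : Int) + 1).toNat = c + 1 := by omega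
  have er0 : ((r : Int) + 0).toNat = r := by omega
  have ec0 : ((c : Int) + 0).toNat = c := by omega
  unfold pvNb
  simp only [List.any_cons, List.any_nil, Bool.or_false, Bool.or_eq_true, Bool.and_eq_true,
    decide_eq_true_eq, beq_iff_eq, er1, er2, ec1, ec2, er0, ec0]
  constructor
  · rintro (⟨⟨⟨⟨h1, h2⟩, h3⟩, h4⟩, h5⟩ | ⟨⟨⟨⟨h1, h2⟩, h3⟩, h4⟩, h5⟩ |
      ⟨⟨⟨⟨h1, h2⟩, h3⟩, h4⟩, h5⟩ | ⟨⟨⟨⟨h1, h2⟩, h3⟩, h4⟩, h5⟩)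
    · exact Or.inl ⟨by omega, by omega, by omega, h5⟩
    · exact Or.inr (Or.inl ⟨by omega, by omega, h5⟩)
    · exact Or.inr (Or.inr (Or.inl ⟨by omega, by omega, by omega, h5⟩))
    · exact Or.inr (Or.inr (Or.inr ⟨by omega, by omega, h5⟩))
  · rintro (⟨h1, h2, h3, h4⟩ | ⟨h1, h2, h3⟩ | ⟨h1, h2, h3, h4⟩ | ⟨h1, h2, h3⟩)
    · exact Or.inl ⟨⟨⟨⟨by omega, by omega⟩, by omega⟩, by omega⟩, h4⟩
    · exact Or.inr (Or.inl ⟨⟨⟨⟨by omega, by omega⟩, by omega⟩, by omega⟩, h3⟩)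
    · exact Or.inr (Or.inr (Or.inl ⟨⟨⟨⟨by omega, by omega⟩, by omega⟩, by omega⟩, h4⟩))
    · exact Or.inr (Or.inr (Or.inr ⟨⟨⟨⟨by omega, by omega⟩, by omega⟩, by omega⟩, h3⟩))

-- the common pointwise "intended result" of both programs
def pvSpecCell (grid : List (List Int)) (rows cols r c : Nat) (v : Int) : Int :=
  if c < cols ∧ v = 2 ∧ pvNb grid rows cols r c = false then 1 else v

def pvSpecGrid (grid : List (List Int)) : List (List Int) :=
  grid.mapIdx (fun r row => row.mapIdx (fun c v =>
    pvSpecCell grid grid.length (grid.headD []).length r c v))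

-- two grids with equal optional lookups everywhere are equal
theorem eq_of_pvVal (g g' : List (List Int)) (hlen : g.length = g'.length)
    (hval : ∀ r c : Nat, pvVal g r c = pvVal g' r c) : g = g' := by
  apply List.ext_getElem?
  intro r
  cases hg : g[r]? with
  | none =>
    cases hg' : g'[r]? with
    | none => rfl
    | some ro' =>
      exfalso
      have h1 : ¬ r < g.length := by simpa using List.getElem?_eq_none_iff.mp hg
      have h2 : r < g'.length := (List.getElem?_eq_some_iff.mp hg').1
      omega
  | some ro =>
    cases hg' : g'[r]? with
    | none =>
      exfalso
      have h1 : r < g.length := (List.getElem?_eq_some_iff.mp hg).1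
      have h2 : ¬ r < g'.length := by simpa using List.getElem?_eq_none_iff.mp hg'
      omega
    | some ro' =>
      have hro : ro = ro' := by
        apply List.ext_getElem?
        intro c
        have := hval r c
        unfold pvVal at this
        rw [hg, hg'] at this
        simpa using this
      rw [hro]

-- ---- A-side: invariant over the row-major mutation ----

def InvA (grid : List (List Int)) (cols : Nat) (pr : Nat → Nat → Prop)
    [∀ r c, Decidable (pr r c)] (g : List (List Int)) : Prop :=
  g.length = grid.length ∧
  (∀ r c : Nat, pvVal g r c =
    if pr r c ∧ pvVal grid r c = some 2 ∧ pvNb grid grid.length cols r c = false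
    then some 1 else pvVal grid r c)

theorem invA_mono (grid : List (List Int)) (cols : Nat) (pr pr' : Nat → Nat → Prop)
    [∀ r c, Decidable (pr r c)] [∀ r c, Decidable (pr' r c)] (g : List (List Int))
    (hpr : ∀ r c : Nat,
      (pr' r c ∧ pvVal grid r c = some 2 ∧ pvNb grid grid.length cols r c = false) ↔
      (pr r c ∧ pvVal grid r c = some 2 ∧ pvNb grid grid.length cols r c = false))
    (h : InvA grid cols pr g) : InvA grid cols pr' g := by
  obtain ⟨h1, h3⟩ := h
  refine ⟨h1, ?_⟩
  intro r c
  rw [h3 r c]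
  exact if_congr (hpr r c).symm rfl rfl

-- a cell adjacent to a 2-cell (in bounds) has a 2-neighbor
theorem pvNb_of_adj (grid : List (List Int)) (cols r c nr nc : Nat)
    (hr : r < grid.length) (hc : c < cols) (hv : pvVal grid r c = some 2)
    (hadj : (nr = r + 1 ∧ nc = c) ∨ (r = nr + 1 ∧ nc = c) ∨
            (nr = r ∧ nc = c + 1) ∨ (nr = r ∧ c = nc + 1)) :
    pvNb grid grid.length cols nr nc = true := by
  rw [pvNb_iff]
  rcases hadj with ⟨rfl, rfl⟩ | ⟨hre, rfl⟩ | ⟨rfl, rfl⟩ | ⟨rfl, hce⟩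
  · exact Or.inl ⟨by omega, by omega, hc, by simpa using hv⟩
  · refine Or.inr (Or.inl ⟨by omega, hc, ?_⟩)
    rw [← hre]; exact hv
  · exact Or.inr (Or.inr (Or.inl ⟨hr, by omega, by omega, by simpa using hv⟩))
  · refine Or.inr (Or.inr (Or.inr ⟨hr, by omega, ?_⟩))
    rw [← hce]; exact hv

-- effect of grid[r][c] = v on the lookups
theorem pvVal_modify (g : List (List Int)) (r c : Nat) (v : Int)
    (hv : (pvVal g r c).isSome) (r' c' : Nat) :
    pvVal (g.modify r (fun row => row.set c v)) r' c' =
      if r' = r ∧ c' = c then some v else pvVal g r' c' := by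
  unfold pvVal at hv ⊢
  rw [List.getElem?_modify]
  cases hg : g[r']? with
  | none =>
    have : ¬ (r' = r ∧ c' = c) := by
      rintro ⟨rfl, rfl⟩
      rw [hg] at hv; simp at hv
    simp [this]
  | some ro =>
    by_cases hrr : r = r'
    · subst hrr
      rw [hg] at hv
      simp only [Option.bind_some] at hv
      have hcl : c < ro.length := by
        cases hro : ro[c]? with
        | none => rw [hro] at hv; simp at hv
        | some _ => exact (List.getElem?_eq_some_iff.mp hro).1
      simp only [Option.bind_some]
      by_cases hcc : c' = c
      · subst hcc
        simp [hcl]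
      · simp [Ne.symm hcc, hcc]
    · have : ¬ (r' = r ∧ c' = c) := by rintro ⟨rfl, _⟩; exact hrr rfl
      simp [hrr, this]

theorem stepA_inv (grid : List (List Int)) (cols R C : Nat) (g : List (List Int))
    (hR : R < grid.length) (hC : C < cols)
    (h : InvA grid cols (fun r c => (r < R ∨ (r = R ∧ c < C)) ∧ c < cols) g) :
    InvA grid cols (fun r c => (r < R ∨ (r = R ∧ c < C + 1)) ∧ c < cols)
      (pvStepA grid.length cols R g C) := by
  obtain ⟨hlen, hval⟩ := h
  have hgRC : pvVal g R C = pvVal grid R C := by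
    rw [hval R C]
    rw [if_neg]
    rintro ⟨⟨h1, _⟩, _⟩
    omega
  unfold pvStepA
  by_cases h2 : pvVal grid R C = some 2
  case neg =>
    -- cell is not a 2: nothing happens
    rw [if_neg (by simp [hgRC, h2])]
    refine invA_mono grid cols _ _ g ?_ ⟨hlen, hval⟩
    intro r c
    by_cases hrc : r = R ∧ c = C
    · obtain ⟨rfl, rfl⟩ := hrc
      constructor
      · rintro ⟨_, hx, _⟩; exact absurd hx h2
      · rintro ⟨_, hx, _⟩; exact absurd hx h2
    · constructor
      · rintro ⟨hp, hx⟩; exact ⟨by omega, hx⟩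
      · rintro ⟨hp, hx⟩; exact ⟨by omega, hx⟩
  case pos =>
    rw [if_pos (by simp [hgRC, h2])]
    -- the neighbor probe on the mutated grid agrees with the probe on the original
    have hadjval : ∀ nr nc : Nat,
        ((nr = R + 1 ∧ nc = C) ∨ (R = nr + 1 ∧ nc = C) ∨
         (nr = R ∧ nc = C + 1) ∨ (nr = R ∧ C = nc + 1)) →
        pvVal g nr nc = pvVal grid nr nc := by
      intro nr nc hadj
      rw [hval nr nc]
      rw [if_neg]
      rintro ⟨_, _, hnbf⟩
      have := pvNb_of_adj grid cols R C nr nc hR hC h2 hadj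
      exact absurd (hnbf.symm.trans this) (by decide)
    have hnb : pvNb g grid.length cols R C = pvNb grid grid.length cols R C := by
      rw [Bool.eq_iff_iff, pvNb_iff, pvNb_iff]
      constructor
      · rintro (⟨h1, h2', h3, h4⟩ | ⟨h1, h2', h3⟩ | ⟨h1, h2', h3, h4⟩ | ⟨h1, h2', h3⟩)
        · exact Or.inl ⟨h1, h2', h3, by rw [← hadjval _ _ (Or.inr (Or.inl ⟨by omega, rfl⟩))]; exact h4⟩
        · exact Or.inr (Or.inl ⟨h1, h2', by rw [← hadjval _ _ (Or.inl ⟨rfl, rfl⟩)]; exact h3⟩)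
        · exact Or.inr (Or.inr (Or.inl ⟨h1, h2', h3, by
            rw [← hadjval _ _ (Or.inr (Or.inr (Or.inr ⟨rfl, by omega⟩)))]; exact h4⟩))
        · exact Or.inr (Or.inr (Or.inr ⟨h1, h2', by
            rw [← hadjval _ _ (Or.inr (Or.inr (Or.inl ⟨rfl, rfl⟩)))]; exact h3⟩))
      · rintro (⟨h1, h2', h3, h4⟩ | ⟨h1, h2', h3⟩ | ⟨h1, h2', h3, h4⟩ | ⟨h1, h2', h3⟩)
        · exact Or.inl ⟨h1, h2', h3, by rw [hadjval _ _ (Or.inr (Or.inl ⟨by omega, rfl⟩))]; exact h4⟩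
        · exact Or.inr (Or.inl ⟨h1, h2', by rw [hadjval _ _ (Or.inl ⟨rfl, rfl⟩)]; exact h3⟩)
        · exact Or.inr (Or.inr (Or.inl ⟨h1, h2', h3, by
            rw [hadjval _ _ (Or.inr (Or.inr (Or.inr ⟨rfl, by omega⟩)))]; exact h4⟩))
        · exact Or.inr (Or.inr (Or.inr ⟨h1, h2', by
            rw [hadjval _ _ (Or.inr (Or.inr (Or.inl ⟨rfl, rfl⟩)))]; exact h3⟩))
    by_cases hnbv : pvNb grid grid.length cols R C = true
    · rw [if_pos (by rw [hnb]; exact hnbv)]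
      refine invA_mono grid cols _ _ g ?_ ⟨hlen, hval⟩
      intro r c
      by_cases hrc : r = R ∧ c = C
      · obtain ⟨rfl, rfl⟩ := hrc
        constructor
        · rintro ⟨_, _, hf⟩; rw [hnbv] at hf; cases hf
        · rintro ⟨_, _, hf⟩; rw [hnbv] at hf; cases hf
      · constructor
        · rintro ⟨hp, hx⟩; exact ⟨by omega, hx⟩
        · rintro ⟨hp, hx⟩; exact ⟨by omega, hx⟩
    · have hnbf : pvNb grid grid.length cols R C = false := by
        cases hx : pvNb grid grid.length cols R C
        · rfl
        · exact absurd hx hnbv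
      rw [if_neg (by rw [hnb]; simp [hnbf])]
      have hsome : (pvVal g R C).isSome := by rw [hgRC, h2]; rfl
      constructor
      · rw [List.length_modify]; exact hlen
      · intro r c
        rw [pvVal_modify g R C 1 hsome r c]
        by_cases hrc : r = R ∧ c = C
        · obtain ⟨rfl, rfl⟩ := hrc
          rw [if_pos ⟨rfl, rfl⟩, if_pos ⟨by omega, h2, hnbf⟩]
        · rw [if_neg hrc, hval r c]
          refine if_congr ?_ rfl rfl
          constructor
          · rintro ⟨hp, hx⟩; exact ⟨by omega, hx⟩
          · rintro ⟨hp, hx⟩; exact ⟨by omega, hx⟩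

theorem rowA_inv (grid : List (List Int)) (cols R : Nat) (g : List (List Int))
    (hR : R < grid.length)
    (h : InvA grid cols (fun r c => r < R ∧ c < cols) g) :
    InvA grid cols (fun r c => r < R + 1 ∧ c < cols) (pvRowA grid.length cols g R) := by
  unfold pvRowA
  have main : ∀ C, C ≤ cols →
      InvA grid cols (fun r c => (r < R ∨ (r = R ∧ c < C)) ∧ c < cols)
        ((List.range C).foldl (pvStepA grid.length cols R) g) := by
    intro C
    induction C with
    | zero =>
      intro _
      refine invA_mono grid cols _ _ g ?_ h
      intro r c
      constructor
      · rintro ⟨hp, hx⟩; exact ⟨by omega, hx⟩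
      · rintro ⟨hp, hx⟩; exact ⟨by omega, hx⟩
    | succ C ih =>
      intro hC
      rw [List.range_succ, List.foldl_append, List.foldl_cons, List.foldl_nil]
      exact stepA_inv grid cols R C _ hR (by omega) (ih (by omega))
  refine invA_mono grid cols _ _ _ ?_ (main cols le_rfl)
  intro r c
  constructor
  · rintro ⟨hp, hx⟩; exact ⟨by omega, hx⟩
  · rintro ⟨hp, hx⟩; exact ⟨by omega, hx⟩

theorem foldA_inv (grid : List (List Int)) (cols : Nat) : ∀ R, R ≤ grid.length →
    InvA grid cols (fun r c => r < R ∧ c < cols)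
      ((List.range R).foldl (pvRowA grid.length cols) grid) := by
  intro R
  induction R with
  | zero =>
    intro _
    simp only [List.range_zero, List.foldl_nil]
    refine ⟨rfl, fun r c => ?_⟩
    rw [if_neg]
    rintro ⟨⟨h0, _⟩, _⟩
    omega
  | succ R ih =>
    intro hR
    rw [List.range_succ, List.foldl_append, List.foldl_cons, List.foldl_nil]
    exact rowA_inv grid cols R _ (by omega) (ih (by omega))

-- A computes the common spec
theorem A_eq_spec (grid : List (List Int)) : solve_aedd82e4 grid = pvSpecGrid grid := by
  obtain ⟨hlen, hval⟩ := foldA_inv grid (grid.headD []).length grid.length le_rfl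
  unfold solve_aedd82e4
  apply eq_of_pvVal
  · rw [hlen]
    unfold pvSpecGrid
    rw [List.length_mapIdx]
  · intro r c
    rw [hval r c]
    have hspec : pvVal (pvSpecGrid grid) r c =
        Option.map (pvSpecCell grid grid.length (grid.headD []).length r c) (pvVal grid r c) := by
      unfold pvSpecGrid pvVal
      rw [List.getElem?_mapIdx]
      cases grid[r]? with
      | none => rfl
      | some row =>
        simp only [Option.map_some, Option.bind_some, List.getElem?_mapIdx]
    rw [hspec]
    cases hv : pvVal grid r c with
    | none =>
      rw [if_neg]
      · rfl
      · rintro ⟨_, hx, _⟩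
        simp at hx
    | some v =>
      have hrlt : r < grid.length := by
        unfold pvVal at hv
        cases hg : grid[r]? with
        | none => rw [hg] at hv; cases hv
        | some row => exact (List.getElem?_eq_some_iff.mp hg).1
      simp only [Option.map_some]
      unfold pvSpecCell
      by_cases hcond : c < (grid.headD []).length ∧ v = 2 ∧
          pvNb grid grid.length (grid.headD []).length r c = false
      · rw [if_pos ⟨⟨hrlt, hcond.1⟩, by rw [hcond.2.1], hcond.2.2⟩, if_pos hcond]
      · rw [if_neg, if_neg hcond]
        rintro ⟨⟨_, hc1⟩, hc2, hc3⟩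
        exact hcond ⟨hc1, Option.some.inj hc2, hc3⟩

-- ---- B-side: membership in the pair set ----

theorem mem_outer {Q : Nat → Nat × Nat → Prop}
    (f : PySem.Set (Nat × Nat) → Nat → PySem.Set (Nat × Nat)) (x : Nat × Nat)
    (hF : ∀ c s, x ∈ f s c ↔ x ∈ s ∨ Q c x) :
    ∀ (n : Nat) (s0 : PySem.Set (Nat × Nat)),
      x ∈ (List.range n).foldl f s0 ↔ x ∈ s0 ∨ ∃ r < n, Q r x := by
  intro n
  induction n with
  | zero => intro s0; simp
  | succ n ih =>
    intro s0
    rw [List.range_succ, List.foldl_append, List.foldl_cons, List.foldl_nil, hF, ih]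
    constructor
    · rintro ((h | ⟨r, hr, hq⟩) | h)
      · exact Or.inl h
      · exact Or.inr ⟨r, by omega, hq⟩
      · exact Or.inr ⟨n, by omega, h⟩
    · rintro (h | ⟨r, hr, hq⟩)
      · exact Or.inl (Or.inl h)
      · by_cases hrn : r = n
        · subst hrn; exact Or.inr hq
        · exact Or.inl (Or.inr ⟨r, by omega, hq⟩)

theorem mem_hstep (grid : List (List Int)) (r : Nat) (s : PySem.Set (Nat × Nat))
    (c : Nat) (x : Nat × Nat) :
    x ∈ pvHStep grid r s c ↔ x ∈ s ∨
      (pvVal grid r c = some 2 ∧ pvVal grid r (c + 1) = some 2 ∧ (x = (r, c) ∨ x = (r, c + 1))) := by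
  unfold pvHStep
  split_ifs with h
  · simp only [Bool.and_eq_true, beq_iff_eq] at h
    rw [PySem.Set.mem_add, PySem.Set.mem_add]
    tauto
  · simp only [Bool.and_eq_true, beq_iff_eq, not_and_or] at h
    tauto

theorem mem_vstep (grid : List (List Int)) (r : Nat) (s : PySem.Set (Nat × Nat))
    (c : Nat) (x : Nat × Nat) :
    x ∈ pvVStep grid r s c ↔ x ∈ s ∨
      (pvVal grid r c = some 2 ∧ pvVal grid (r + 1) c = some 2 ∧ (x = (r, c) ∨ x = (r + 1, c))) := by
  unfold pvVStep
  split_ifs with h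
  · simp only [Bool.and_eq_true, beq_iff_eq] at h
    rw [PySem.Set.mem_add, PySem.Set.mem_add]
    tauto
  · simp only [Bool.and_eq_true, beq_iff_eq, not_and_or] at h
    tauto

theorem mem_hfold (grid : List (List Int)) (r : Nat) (x : Nat × Nat) (m : Nat)
    (s0 : PySem.Set (Nat × Nat)) :
    x ∈ (List.range m).foldl (pvHStep grid r) s0 ↔
      x ∈ s0 ∨ ∃ c < m, pvVal grid r c = some 2 ∧ pvVal grid r (c + 1) = some 2 ∧
        (x = (r, c) ∨ x = (r, c + 1)) := by
  exact mem_outer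
    (Q := fun c x => pvVal grid r c = some 2 ∧ pvVal grid r (c + 1) = some 2 ∧
      (x = (r, c) ∨ x = (r, c + 1)))
    (pvHStep grid r) x (fun c s => mem_hstep grid r s c x) m s0

theorem mem_vfold (grid : List (List Int)) (r : Nat) (x : Nat × Nat) (m : Nat)
    (s0 : PySem.Set (Nat × Nat)) :
    x ∈ (List.range m).foldl (pvVStep grid r) s0 ↔
      x ∈ s0 ∨ ∃ c < m, pvVal grid r c = some 2 ∧ pvVal grid (r + 1) c = some 2 ∧
        (x = (r, c) ∨ x = (r + 1, c)) := by
  exact mem_outer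
    (Q := fun c x => pvVal grid r c = some 2 ∧ pvVal grid (r + 1) c = some 2 ∧
      (x = (r, c) ∨ x = (r + 1, c)))
    (pvVStep grid r) x (fun c s => mem_vstep grid r s c x) m s0

-- the final set holds exactly the 2-cells with a 2-neighbor
theorem mem_s2 (grid : List (List Int)) (r c : Nat) (hr : r < grid.length)
    (hc : c < (grid.headD []).length) :
    ((r, c) ∈
      (List.range (grid.length - 1)).foldl
        (fun s r => (List.range (grid.headD []).length).foldl (pvVStep grid r) s)
        ((List.range grid.length).foldl
          (fun s r => (List.range ((grid.headD []).length - 1)).foldl (pvHStep grid r) s)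
          PySem.Set.empty)) ↔
      pvVal grid r c = some 2 ∧ pvNb grid grid.length (grid.headD []).length r c = true := by
  rw [mem_outer
      (Q := fun r' x => ∃ c' < (grid.headD []).length, pvVal grid r' c' = some 2 ∧
        pvVal grid (r' + 1) c' = some 2 ∧ (x = (r', c') ∨ x = (r' + 1, c')))
      (fun s r' => (List.range (grid.headD []).length).foldl (pvVStep grid r') s) (r, c)
      (fun r' s => mem_vfold grid r' (r, c) (grid.headD []).length s),
    mem_outer
      (Q := fun r' x => ∃ c' < (grid.headD []).length - 1, pvVal grid r' c' = some 2 ∧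
        pvVal grid r' (c' + 1) = some 2 ∧ (x = (r', c') ∨ x = (r', c' + 1)))
      (fun s r' => (List.range ((grid.headD []).length - 1)).foldl (pvHStep grid r') s) (r, c)
      (fun r' s => mem_hfold grid r' (r, c) ((grid.headD []).length - 1) s)]
  have hemp : ((r, c) ∈ (PySem.Set.empty : PySem.Set (Nat × Nat))) ↔ False := by
    simp [PySem.Set.empty]
  rw [hemp]
  simp only [false_or]
  rw [pvNb_iff]
  constructor
  · rintro (⟨r', hr', ⟨c', hc', hv1, hv2, hx⟩⟩ | ⟨r', hr', ⟨c', hc', hv1, hv2, hx⟩⟩)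
    · -- horizontal pair
      rcases hx with hx | hx
      · simp only [Prod.mk.injEq] at hx
        obtain ⟨rfl, rfl⟩ := hx
        exact ⟨hv1, Or.inr (Or.inr (Or.inr ⟨hr, by omega, hv2⟩))⟩
      · simp only [Prod.mk.injEq] at hx
        obtain ⟨rfl, hce⟩ := hx
        refine ⟨by rw [hce]; exact hv2,
          Or.inr (Or.inr (Or.inl ⟨hr, by omega, by omega, ?_⟩))⟩
        have he : c - 1 = c' := by omega
        rw [he]; exact hv1
    · -- vertical pair
      rcases hx with hx | hx
      · simp only [Prod.mk.injEq] at hx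
        obtain ⟨rfl, rfl⟩ := hx
        exact ⟨hv1, Or.inr (Or.inl ⟨by omega, hc, hv2⟩)⟩
      · simp only [Prod.mk.injEq] at hx
        obtain ⟨hre, rfl⟩ := hx
        refine ⟨by rw [hre]; exact hv2, Or.inl ⟨by omega, by omega, hc, ?_⟩⟩
        have he : r - 1 = r' := by omega
        rw [he]; exact hv1
  · rintro ⟨hv, hnb | hnb | hnb | hnb⟩
    · -- up neighbor: vertical pair (r-1, c)-(r, c)
      obtain ⟨h1, h2, h3, h4⟩ := hnb
      refine Or.inr ⟨r - 1, by omega, c, h3, h4, ?_, Or.inr ?_⟩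
      · have he : r - 1 + 1 = r := by omega
        rw [he]; exact hv
      · have he : r - 1 + 1 = r := by omega
        rw [he]
    · -- down neighbor: vertical pair (r, c)-(r+1, c)
      obtain ⟨h1, h2, h3⟩ := hnb
      exact Or.inr ⟨r, by omega, c, hc, hv, h3, Or.inl rfl⟩
    · -- left neighbor: horizontal pair (r, c-1)-(r, c)
      obtain ⟨h1, h2, h3, h4⟩ := hnb
      refine Or.inl ⟨r, by omega, c - 1, by omega, h4, ?_, Or.inr ?_⟩
      · have he : c - 1 + 1 = c := by omega
        rw [he]; exact hv
      · have he : c - 1 + 1 = c := by omega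
        rw [he]
    · -- right neighbor: horizontal pair (r, c)-(r, c+1)
      obtain ⟨h1, h2, h3⟩ := hnb
      exact Or.inl ⟨r, by omega, c, by omega, hv, h3, Or.inl rfl⟩

theorem contains_iff_mem_set (s : PySem.Set (Nat × Nat)) (x : Nat × Nat) :
    PySem.Set.contains s x = true ↔ x ∈ s := by
  simp [PySem.Set.contains]

-- B computes the common spec
theorem B_eq_spec (grid : List (List Int)) : solve_aedd82e4_alt grid = pvSpecGrid grid := by
  unfold solve_aedd82e4_alt pvSpecGrid
  dsimp only
  apply eq_of_pvVal
  · rw [List.length_mapIdx, List.length_mapIdx]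
  · intro r c
    unfold pvVal
    rw [List.getElem?_mapIdx, List.getElem?_mapIdx]
    cases hg : grid[r]? with
    | none => rfl
    | some row =>
      have hrlt : r < grid.length := (List.getElem?_eq_some_iff.mp hg).1
      simp only [Option.map_some, Option.bind_some, List.getElem?_mapIdx]
      cases hrow : row[c]? with
      | none => rfl
      | some v =>
        simp only [Option.map_some, Option.some.injEq]
        have hvv : pvVal grid r c = some v := by
          unfold pvVal; rw [hg]; simpa using hrow
        by_cases hc : c < (grid.headD []).length
        case neg =>
          have hb : (decide (c < (grid.headD []).length) && (v == 2) &&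
              !(PySem.Set.contains ((List.range (grid.length - 1)).foldl
                (fun s r => (List.range (grid.headD []).length).foldl (pvVStep grid r) s)
                ((List.range grid.length).foldl
                  (fun s r => (List.range ((grid.headD []).length - 1)).foldl (pvHStep grid r) s)
                  PySem.Set.empty)) (r, c))) = false := by
            have hd : decide (c < (grid.headD []).length) = false := by
              simpa using hc
            rw [hd]
            rfl
          rw [hb]
          rw [if_neg (by simp)]
          unfold pvSpecCell
          rw [if_neg (fun h => hc h.1)]
        case pos =>
          have hmem := mem_s2 grid r c hrlt hc
          by_cases hnb : pvNb grid grid.length (grid.headD []).length r c = true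
          · -- has a 2-neighbor: both keep v
            by_cases hv2 : v = 2
            · subst hv2
              have hct := (contains_iff_mem_set _ _).mpr (hmem.mpr ⟨hvv, hnb⟩)
              rw [hct]
              rw [if_neg (by simp)]
              unfold pvSpecCell
              rw [if_neg (by rintro ⟨_, _, hf⟩; exact absurd (hf.symm.trans hnb) (by decide))]
            · have hvb : (v == 2) = false := by simpa using hv2
              rw [hvb]
              rw [if_neg (by simp)]
              unfold pvSpecCell
              rw [if_neg (by rintro ⟨_, hf, _⟩; exact hv2 hf)]
          · have hnbf : pvNb grid grid.length (grid.headD []).length r c = false := by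
              cases hx : pvNb grid grid.length (grid.headD []).length r c
              · rfl
              · exact absurd hx hnb
            by_cases hv2 : v = 2
            · subst hv2
              have hcf : PySem.Set.contains ((List.range (grid.length - 1)).foldl
                  (fun s r => (List.range (grid.headD []).length).foldl (pvVStep grid r) s)
                  ((List.range grid.length).foldl
                    (fun s r => (List.range ((grid.headD []).length - 1)).foldl (pvHStep grid r) s)
                    PySem.Set.empty)) (r, c) = false := by
                cases hx : PySem.Set.contains ((List.range (grid.length - 1)).foldl
                    (fun s r => (List.range (grid.headD []).length).foldl (pvVStep grid r) s)
                    ((List.range grid.length).foldl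
                      (fun s r => (List.range ((grid.headD []).length - 1)).foldl (pvHStep grid r) s)
                      PySem.Set.empty)) (r, c)
                · rfl
                · exact absurd ((hmem.mp ((contains_iff_mem_set _ _).mp hx)).2) hnb
              rw [hcf]
              have hd : decide (c < (grid.headD []).length) = true := by
                simpa using hc
              rw [hd]
              rw [if_pos (by decide)]
              unfold pvSpecCell
              rw [if_pos ⟨hc, rfl, hnbf⟩]
            · have hvb : (v == 2) = false := by simpa using hv2
              rw [hvb]
              rw [if_neg (by simp)]
              unfold pvSpecCell
              rw [if_neg (by rintro ⟨_, hf, _⟩; exact hv2 hf)]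

-- ===== VERDICT (by name: the statement is the Claim_ definition above) =====
theorem solve_aedd82e4_spec : Claim_equal_solve_aedd82e4 := by
  intro grid _ _
  unfold Spec_solve_aedd82e4
  rw [A_eq_spec, B_eq_spec]
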